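-- pv_equiv track=rewrite | github.com/Rufidatul726/scene-crafter | python-scripts/backend/utils/postprocess/nodes_processing/parent_checking.py | first_node_remove_parent
-- ===== SOURCE A (Python) =====
-- def first_node_remove_parent(scene_content):
--     """Remove the parent attribute from the first node in the scene."""
--     # Split the scene content into individual lines
--     scene_lines = scene_content.splitlines()
--     cleaned_lines = []
--     first_node = True
--
--     for line in scene_lines:
--         # Skip lines that don’t meet our conditions
--         line = line.strip()
--
--         # Skip empty lines
--         if not line:
--             continue
--
--         # If it's the first node, remove the parent attribute
--         if first_node and line.startswith("[node"):
--             if "parent=" in line: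
--                 line = line.replace(' parent="."', "")
--             first_node = False
--
--         cleaned_lines.append(line)
--
--     # Reassemble the scene content
--     cleaned_scene = "\n".join(cleaned_lines)
--     return cleaned_scene
-- ===== SOURCE B (Python) =====
-- def first_node_remove_parent(scene_content):
--     """Remove the parent attribute from the first node in the scene."""
--     # Normalize once into a single string with an artificial leading newline,
--     # then edit it by substring search and splicing instead of a line loop.
--     text = "\n" + "\n".join(l.strip() for l in scene_content.splitlines() if l.strip())
--     k = text.find("\n[node")
--     if k == -1:
--         return text[1:]
--     end = text.find("\n", k + 1)
--     if end == -1: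
--         end = len(text)
--     line = text[k + 1:end]
--     if "parent=" in line:
--         line = line.replace(' parent="."', '')
--     return (text[:k + 1] + line + text[end:])[1:]
-- ===== Notes on version B (the rewrite author's own statement) =====
-- stated objective: alternative
-- what changed: Instead of A's line loop threading a first_node flag, B joins the cleaned lines into one string with a sentinel leading newline and edits it by substring search (find '\n[node', find the following '\n') and slice splicing; no per-line scan for the node header.
import Mathlib
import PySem

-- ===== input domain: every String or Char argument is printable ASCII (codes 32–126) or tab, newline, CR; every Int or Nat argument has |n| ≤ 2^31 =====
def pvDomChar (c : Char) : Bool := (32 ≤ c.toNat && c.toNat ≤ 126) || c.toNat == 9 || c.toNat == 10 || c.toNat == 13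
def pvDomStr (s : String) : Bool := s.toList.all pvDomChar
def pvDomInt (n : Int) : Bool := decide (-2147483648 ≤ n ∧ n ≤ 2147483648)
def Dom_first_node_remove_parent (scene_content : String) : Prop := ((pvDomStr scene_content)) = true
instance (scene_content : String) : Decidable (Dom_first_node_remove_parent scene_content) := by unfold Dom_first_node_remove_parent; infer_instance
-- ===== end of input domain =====

-- B edits the joined cleaned text by substring search and slice splicing instead of A's
-- per-line loop with a first_node flag; objective: alternative (same cost, different mechanism).

-- ===== PORT A =====
def pvStepA (st : List String × Bool) (line : String) : List String × Bool :=
  let line := PySem.Str.strip line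
  if line = "" then st
  else if st.2 && PySem.Str.startswith line "[node" then
    let line := if PySem.Str.isIn "parent=" line then PySem.Str.replace line " parent=\".\"" "" else line
    (st.1 ++ [line], false)
  else (st.1 ++ [line], st.2)

def first_node_remove_parent (scene_content : String) : String :=
  let scene_lines := PySem.Str.splitlines scene_content
  let res := scene_lines.foldl pvStepA ([], true)
  PySem.Str.join "\n" res.1

-- ===== PORT B =====
def first_node_remove_parent_alt (scene_content : String) : String :=
  let text := "\n" ++ PySem.Str.join "\n" (((PySem.Str.splitlines scene_content).map PySem.Str.strip).filter (· ≠ ""))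
  let k := PySem.Str.find text "\n[node"
  if k = -1 then
    PySem.Str.slice text (some 1) none
  else
    let e := PySem.Str.findFrom text "\n" (k + 1)
    let e2 := if e = -1 then PySem.Str.len text else e
    let line := PySem.Str.slice text (some (k + 1)) (some e2)
    let line2 := if PySem.Str.isIn "parent=" line then PySem.Str.replace line " parent=\".\"" "" else line
    PySem.Str.slice (PySem.Str.slice text none (some (k + 1)) ++ line2 ++ PySem.Str.slice text (some e2) none) (some 1) none

-- ===== PRECONDITION & SPEC =====
def Spec_first_node_remove_parent (scene_content : String) (out : String) : Prop := out = first_node_remove_parent_alt scene_content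
instance (scene_content : String) (out : String) : Decidable (Spec_first_node_remove_parent scene_content out) := by unfold Spec_first_node_remove_parent; infer_instance

-- ===== CLAIM (what is proved, stated in full; the proofs are below) =====
def Claim_equal_first_node_remove_parent : Prop := ∀ (scene_content : String), Dom_first_node_remove_parent scene_content → Spec_first_node_remove_parent scene_content (first_node_remove_parent scene_content)

-- ===== LEMMAS AND PROOFS =====

-- proof-layer constants
def pvNode : List Char := ['[', 'n', 'o', 'd', 'e']
def pvPat : List Char := '\n' :: pvNode
def pvParent : List Char := ['p', 'a', 'r', 'e', 'n', 't', '=']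
def pvOld : List Char := [' ', 'p', 'a', 'r', 'e', 'n', 't', '=', '"', '.', '"']

-- intermediate: first-node patch on the list of cleaned lines (String level, for A's loop)
def pvFixFirst : List String → List String
  | [] => []
  | l :: ls =>
    if PySem.Str.startswith l "[node" then
      (if PySem.Str.isIn "parent=" l then PySem.Str.replace l " parent=\".\"" "" else l) :: ls
    else l :: pvFixFirst ls

-- the same patch at the char level
def pvFixFirstC : List (List Char) → List (List Char)
  | [] => []
  | l :: ls =>
    if PySem.Chars.startswith l pvNode then
      (if PySem.Chars.isIn pvParent l then PySem.Chars.replace l pvOld [] else l) :: ls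
    else l :: pvFixFirstC ls

-- B's surgery at the char level (mirror of the alt port's body on lists)
def pvSurg (cs : List Char) : List Char :=
  let text := '\n' :: cs
  let k := PySem.Chars.find text pvPat
  if k = -1 then text.drop 1
  else
    let e := PySem.Chars.findFrom text ['\n'] (k + 1)
    let e2 := if e = -1 then (text.length : Int) else e
    let line := PySem.List.slice text (some (k + 1)) (some e2)
    let line2 := if PySem.Chars.isIn pvParent line then PySem.Chars.replace line pvOld [] else line
    (PySem.List.slice text none (some (k + 1)) ++ line2 ++ PySem.List.slice text (some e2) none).drop 1

-- ---- A-side: the fold is pvFixFirst of the cleaned lines ----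
lemma foldl_stepA_false (ls : List String) (acc : List String) :
    ls.foldl pvStepA (acc, false) = (acc ++ (ls.map PySem.Str.strip).filter (· ≠ ""), false) := by
  induction ls generalizing acc with
  | nil => simp
  | cons l ls ih =>
    simp only [List.foldl_cons, List.map_cons, List.filter_cons]
    by_cases h : PySem.Str.strip l = ""
    · simp [pvStepA, h, ih]
    · simp [pvStepA, h, ih]

lemma foldl_stepA_true (ls : List String) (acc : List String) :
    (ls.foldl pvStepA (acc, true)).1 = acc ++ pvFixFirst ((ls.map PySem.Str.strip).filter (· ≠ "")) := by
  induction ls generalizing acc with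
  | nil => simp [pvFixFirst]
  | cons l ls ih =>
    simp only [List.foldl_cons, List.map_cons, List.filter_cons]
    by_cases h : PySem.Str.strip l = ""
    · simp [pvStepA, h, ih]
    · by_cases hs : PySem.Str.startswith (PySem.Str.strip l) "[node" = true
      all_goals simp only [PySem.Str.startswith_eq, PySem.Str.toList_strip,
        show ("[node").toList = ['[','n','o','d','e'] from rfl] at hs
      · simp [pvStepA, h, hs, pvFixFirst, foldl_stepA_false]
      · simp [pvStepA, h, hs, pvFixFirst, ih]

lemma A_eq (s : String) :
    first_node_remove_parent s =
      PySem.Str.join "\n" (pvFixFirst (((PySem.Str.splitlines s).map PySem.Str.strip).filter (· ≠ ""))) := by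
  simp [first_node_remove_parent, foldl_stepA_true]

-- ---- bridges String ↔ List Char ----
lemma map_toList_filter_ne_nil (xs : List String) :
    (xs.filter (· ≠ "")).map String.toList = (xs.map String.toList).filter (· ≠ []) := by
  induction xs with
  | nil => simp
  | cons x t ih =>
    by_cases h : x = ""
    · subst h; simpa using ih
    · have h' : x.toList ≠ [] := by simpa [String.toList_eq_nil_iff] using h
      simp [List.filter_cons, h, h']
      simpa using ih

lemma cleaned_bridge (s : String) :
    (((PySem.Str.splitlines s).map PySem.Str.strip).filter (· ≠ "")).map String.toList =
      ((PySem.Chars.splitlines s.toList).map PySem.Chars.strip).filter (· ≠ []) := by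
  rw [map_toList_filter_ne_nil]
  congr 1
  rw [List.map_map]
  have : String.toList ∘ PySem.Str.strip = PySem.Chars.strip ∘ String.toList := by
    funext x; simp [PySem.Str.toList_strip]
  rw [this, ← List.map_map, PySem.Str.splitlines_map_toList]

lemma map_toList_fixFirst (xs : List String) :
    (pvFixFirst xs).map String.toList = pvFixFirstC (xs.map String.toList) := by
  induction xs with
  | nil => simp [pvFixFirst, pvFixFirstC]
  | cons l t ih =>
    simp only [pvFixFirst, pvFixFirstC, List.map_cons]
    by_cases hs : PySem.Chars.startswith l.toList ['[', 'n', 'o', 'd', 'e'] = true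
    · have hs' : PySem.Str.startswith l "[node" = true := by
        rw [PySem.Str.startswith_eq, show ("[node").toList = ['[', 'n', 'o', 'd', 'e'] from rfl]
        exact hs
      by_cases hp : PySem.Chars.isIn ['p', 'a', 'r', 'e', 'n', 't', '='] l.toList = true
      · have hp' : PySem.Str.isIn "parent=" l = true := by
          rw [PySem.Str.isIn_eq, show ("parent=").toList = ['p', 'a', 'r', 'e', 'n', 't', '='] from rfl]
          exact hp
        simp [pvNode, pvParent, pvOld, hs, hs', hp, hp', PySem.Str.toList_replace,
          show (" parent=\".\"").toList = pvOld from rfl, show ("").toList = ([] : List Char) from rfl]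
      · have hp' : ¬ PySem.Str.isIn "parent=" l = true := by
          rw [PySem.Str.isIn_eq, show ("parent=").toList = ['p', 'a', 'r', 'e', 'n', 't', '='] from rfl]
          exact hp
        simp [pvNode, pvParent, pvOld, hs, hs', hp, hp']
    · have hs' : ¬ PySem.Str.startswith l "[node" = true := by
        rw [PySem.Str.startswith_eq, show ("[node").toList = ['[', 'n', 'o', 'd', 'e'] from rfl]
        exact hs
      simp [pvNode, pvParent, pvOld, hs, hs', ih]

lemma slice_one_from (xs : List Char) : PySem.List.slice xs (some 1) none = xs.drop 1 := by
  simpa using PySem.List.slice_from_natCast xs 1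

lemma alt_toList (s : String) :
    (first_node_remove_parent_alt s).toList =
      pvSurg (PySem.Chars.join ['\n']
        (((PySem.Chars.splitlines s.toList).map PySem.Chars.strip).filter (· ≠ []))) := by
  simp only [first_node_remove_parent_alt, pvSurg]
  rw [← cleaned_bridge]
  simp only [PySem.Str.find_eq, PySem.Str.findFrom_eq, PySem.Str.len_eq, PySem.Str.toList_slice,
    PySem.Chars.slice_eq_listSlice, String.toList_append, PySem.Str.toList_join,
    PySem.Str.isIn_eq, PySem.Str.toList_replace,
    show ("\n").toList = ['\n'] from rfl, show ("\n[node").toList = pvPat from rfl,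
    show ("parent=").toList = pvParent from rfl, show (" parent=\".\"").toList = pvOld from rfl,
    show ("").toList = ([]:List Char) from rfl, List.singleton_append, List.length_cons]
  split_ifs <;>
    simp [slice_one_from, PySem.Str.toList_slice, PySem.Chars.slice_eq_listSlice, String.toList_append,
      PySem.Str.toList_replace, PySem.Str.isIn_eq,
      show ("parent=").toList = pvParent from rfl, show (" parent=\".\"").toList = pvOld from rfl,
      show ("").toList = ([]:List Char) from rfl, List.length_cons]

-- ---- '\n'-free lines ----
lemma splitlines_go_mem (isB : Char → Bool) (s cur : List Char) (acc : List (List Char))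
    (hcur : ∀ c ∈ cur, isB c = false)
    (hacc : ∀ l ∈ acc, ∀ c ∈ l, isB c = false) :
    ∀ l ∈ PySem.Chars.splitlines.go isB s cur acc, ∀ c ∈ l, isB c = false := by
  revert hcur hacc
  fun_induction PySem.Chars.splitlines.go <;> intro hcur hacc
  · intro l hl; exact hacc l (by simpa using hl)
  · intro l hl
    simp only [List.mem_reverse, List.mem_cons] at hl
    rcases hl with h | h
    · subst h; intro c hc; exact hcur c (by simpa using hc)
    · exact hacc l h
  · rename_i ih; apply ih <;> intro x hx
    · simp at hx
    · simp only [List.mem_cons] at hx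
      rcases hx with h | h
      · subst h; intro c hc; exact hcur c (by simpa using hc)
      · exact hacc x h
  · rename_i ih; apply ih <;> intro x hx
    · simp at hx
    · simp only [List.mem_cons] at hx
      rcases hx with h | h
      · subst h; intro c hc; exact hcur c (by simpa using hc)
      · exact hacc x h
  · rename_i hni ih; apply ih <;> intro x hx
    · simp only [List.mem_cons] at hx
      rcases hx with h | h
      · subst h; simpa using hni
      · exact hcur x h
    · exact hacc x hx

lemma splitlines_no_nl (cs : List Char) : ∀ l ∈ PySem.Chars.splitlines cs, '\n' ∉ l := by
  intro l hl hmem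
  have h := splitlines_go_mem _ cs [] [] (by simp) (by simp) l (by simpa [PySem.Chars.splitlines] using hl) '\n' hmem
  simp at h

lemma strip_no_nl (l : List Char) (h : '\n' ∉ l) : '\n' ∉ PySem.Chars.strip l := by
  intro hmem
  apply h
  simp only [PySem.Chars.strip, PySem.Chars.rstrip, PySem.Chars.lstrip, List.mem_reverse] at hmem
  exact (List.dropWhile_sublist _).subset ((List.mem_reverse).mp ((List.dropWhile_sublist _).subset hmem))

lemma cleaned_prop (s : String) :
    ∀ l ∈ ((PySem.Chars.splitlines s.toList).map PySem.Chars.strip).filter (· ≠ []), l ≠ [] ∧ '\n' ∉ l := by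
  intro l hl
  have h1 := List.of_mem_filter hl
  have h2 := List.mem_of_mem_filter hl
  refine ⟨by simpa using h1, ?_⟩
  rcases List.mem_map.mp h2 with ⟨p, hp, rfl⟩
  exact strip_no_nl p (splitlines_no_nl _ p hp)

-- ---- find characterisations ----
lemma find_eq_of (cs pat : List Char) (j : Nat) (hj : pat <+: cs.drop j)
    (hmin : ∀ i < j, ¬ pat <+: cs.drop i) : PySem.Chars.find cs pat = (j : Int) := by
  have hinf : pat <:+: cs := hj.isInfix.trans (cs.drop_suffix j).isInfix
  have h0 : (0 : Int) ≤ PySem.Chars.find cs pat := (PySem.Chars.find_nonneg_iff cs pat).mpr hinf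
  obtain ⟨h1, h2⟩ := PySem.Chars.find_spec h0
  have ha : (PySem.Chars.find cs pat).toNat ≤ j := by
    by_contra h; push_neg at h; exact absurd hj (h2 j h)
  have hb : j ≤ (PySem.Chars.find cs pat).toNat := by
    by_contra h; push_neg at h; exact absurd h1 (hmin _ h)
  omega

lemma find_shift (cs pat : List Char) (m : Nat) (hm : m ≤ cs.length)
    (h : ∀ i < m, ¬ pat <+: cs.drop i) :
    PySem.Chars.find cs pat =
      if PySem.Chars.find (cs.drop m) pat = -1 then -1
      else (m : Int) + PySem.Chars.find (cs.drop m) pat := by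
  split_ifs with hd
  · rw [PySem.Chars.find_eq_neg_one_iff] at hd ⊢
    intro hinf
    rcases (PySem.Chars.exists_prefix_drop_iff_isIn pat cs).mpr ((PySem.Chars.isIn_iff_infix pat cs).mpr hinf) with ⟨j, hj⟩
    rcases lt_or_ge j m with hjm | hjm
    · exact h j hjm hj
    · apply hd
      have hdd : cs.drop j = (cs.drop m).drop (j - m) := by rw [List.drop_drop]; congr 1; omega
      rw [hdd] at hj
      exact hj.isInfix.trans ((cs.drop m).drop_suffix (j - m)).isInfix
  · have h0 : (0:Int) ≤ PySem.Chars.find (cs.drop m) pat := by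
      have := PySem.Chars.neg_one_le_find (cs.drop m) pat
      omega
    obtain ⟨h1, h2⟩ := PySem.Chars.find_spec h0
    have heq : PySem.Chars.find cs pat = ((m + (PySem.Chars.find (cs.drop m) pat).toNat : Nat) : Int) := by
      apply find_eq_of
      · rw [← List.drop_drop]; exact h1
      · intro i hi hp
        rcases lt_or_ge i m with him | him
        · exact h i him hp
        · have hdd : cs.drop i = (cs.drop m).drop (i - m) := by rw [List.drop_drop]; congr 1; omega
          rw [hdd] at hp
          exact h2 (i - m) (by omega) hp
    rw [heq]; push_cast [Int.toNat_of_nonneg h0]; ring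

-- a pattern beginning with '\n' cannot start inside a '\n'-free line
lemma no_pref_in_line (l x ps : List Char) (hl : '\n' ∉ l) :
    ∀ i < l.length, ¬ ('\n' :: ps) <+: (l.drop i ++ x) := by
  intro i hi hp
  rw [List.drop_eq_getElem_cons hi] at hp
  rcases List.cons_prefix_cons.mp hp with ⟨h1, -⟩
  exact hl (h1 ▸ List.getElem_mem hi)

lemma prefix_through_nl : ∀ (pat l rest : List Char), '\n' ∉ pat → '\n' ∉ l →
    (pat <+: (l ++ '\n' :: rest) ↔ pat <+: l)
  | [], l, rest, _, _ => by simp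
  | p :: ps, [], rest, hp, hl => by
    simp only [List.nil_append]
    constructor
    · intro h
      obtain ⟨h1, -⟩ := List.cons_prefix_cons.mp h
      exact absurd (h1 ▸ List.mem_cons_self) hp
    · intro h
      exact absurd (List.prefix_nil.mp h) (by simp)
  | p :: ps, c :: l', rest, hp, hl => by
    rw [List.cons_append, List.cons_prefix_cons, List.cons_prefix_cons,
      prefix_through_nl ps l' rest (fun hm => hp (List.mem_cons_of_mem p hm))
        (fun hm => hl (List.mem_cons_of_mem c hm))]

lemma join_cons_of_ne_nil (sep a : List Char) (M : List (List Char)) (h : M ≠ []) :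
    PySem.Chars.join sep (a :: M) = a ++ sep ++ PySem.Chars.join sep M := by
  cases M with
  | nil => exact absurd rfl h
  | cons b M' => exact PySem.Chars.join_cons_cons sep a b M'

lemma fixFirstC_cons_ne_nil (l : List Char) (ls : List (List Char)) :
    pvFixFirstC (l :: ls) ≠ [] := by
  simp only [pvFixFirstC]
  split_ifs <;> simp

-- slice helpers (Python slice indices arrive as Int expressions; reduce them to take/drop)
lemma slice_from_head (x : Char) (xs : List Char) : PySem.List.slice (x::xs) none (some 1) = [x] := by
  simpa using PySem.List.slice_to_natCast (x::xs) 1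

lemma slice_mid (x : Char) (xs : List Char) (n : Nat) :
    PySem.List.slice (x::xs) (some 1) (some ((n:Int)+1)) = xs.take n := by
  rw [show ((n:Int)+1) = ((n+1:Nat):Int) by push_cast; ring, show (1:Int) = ((1:Nat):Int) from rfl,
    PySem.List.slice_natCast]
  simp

lemma slice_from_n1 (x : Char) (xs : List Char) (n : Nat) :
    PySem.List.slice (x::xs) (some ((n:Int)+1)) none = xs.drop n := by
  rw [show ((n:Int)+1) = ((n+1:Nat):Int) by push_cast; ring, PySem.List.slice_from_natCast]
  simp

lemma slice_to_cast (xs : List Char) (a : Nat) :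
    PySem.List.slice xs none (some ((a:Int)+1)) = xs.take (a+1) := by
  rw [show ((a:Int)+1) = (((a+1:Nat)):Int) by push_cast; ring, PySem.List.slice_to_natCast]

lemma slice_mid_cast (xs : List Char) (a b : Nat) :
    PySem.List.slice xs (some ((a:Int)+1)) (some ((b:Int))) =
      List.take (b - (a+1)) (List.drop (a+1) xs) := by
  rw [show ((a:Int)+1) = (((a+1:Nat)):Int) by push_cast; ring, PySem.List.slice_natCast]

-- the surgery skips a leading non-node line
lemma surg_step (l cs : List Char) (hnl : '\n' ∉ l) (hno : ¬ pvNode <+: l)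
    (hnodeNl : '\n' ∉ pvNode) :
    pvSurg (l ++ '\n' :: cs) = l ++ '\n' :: pvSurg cs := by
  set m : Nat := l.length + 1 with hm
  have hdropm : ('\n' :: (l ++ '\n' :: cs)).drop m = '\n' :: cs := by
    rw [hm, show ('\n' :: (l ++ '\n' :: cs)) = ('\n' :: l) ++ ('\n' :: cs) from rfl]
    simpa using List.drop_left ('\n' :: l) ('\n' :: cs)
  have hnot : ∀ i < m, ¬ pvPat <+: ('\n' :: (l ++ '\n' :: cs)).drop i := by
    intro i hi hp
    cases i with
    | zero =>
      rw [List.drop_zero, pvPat] at hp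
      obtain ⟨-, h2⟩ := List.cons_prefix_cons.mp hp
      exact hno ((prefix_through_nl pvNode l cs hnodeNl hnl).mp h2)
    | succ i =>
      rw [List.drop_succ_cons, List.drop_append_of_le_length (by omega)] at hp
      exact no_pref_in_line l ('\n' :: cs) pvNode hnl i (by omega) (by simpa [pvPat] using hp)
  have hshift := find_shift ('\n' :: (l ++ '\n' :: cs)) pvPat m (by simp [hm]) hnot
  rw [hdropm] at hshift
  by_cases hk' : PySem.Chars.find ('\n' :: cs) pvPat = -1
  · rw [hk', if_pos rfl] at hshift
    simp [pvSurg, hshift, hk']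
  · rw [if_neg hk'] at hshift
    have h0 : (0:Int) ≤ PySem.Chars.find ('\n' :: cs) pvPat := by
      have := PySem.Chars.neg_one_le_find ('\n' :: cs) pvPat
      omega
    set j' : Nat := (PySem.Chars.find ('\n' :: cs) pvPat).toNat with hj'def
    have hkval : PySem.Chars.find ('\n' :: cs) pvPat = (j' : Int) := (Int.toNat_of_nonneg h0).symm
    obtain ⟨hpref, -⟩ := PySem.Chars.find_spec h0
    have hj'len : j' + 6 ≤ ('\n' :: cs).length := by
      have hlen := hpref.length_le
      rw [List.length_drop] at hlen
      have hp6 : pvPat.length = 6 := by decide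
      omega
    have houter : PySem.Chars.find ('\n' :: (l ++ '\n' :: cs)) pvPat = ((m + j' : Nat) : Int) := by
      rw [hshift, hkval]; push_cast; ring
    set f := PySem.Chars.find (('\n' :: cs).drop (j' + 1)) ['\n'] with hfdef
    have hfm1 : -1 ≤ f := PySem.Chars.neg_one_le_find _ _
    have hinner : PySem.Chars.findFrom ('\n' :: cs) ['\n'] ((j' : Int) + 1) =
        if f = -1 then -1 else ((j' + 1 : Nat) : Int) + f := by
      rw [show ((j' : Int) + 1) = (((j' + 1 : Nat)) : Int) by push_cast; ring]
      rw [PySem.Chars.findFrom_natCast _ _ (j' + 1) (by simp at hj'len ⊢; omega), ← hfdef]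
    have houterff : PySem.Chars.findFrom ('\n' :: (l ++ '\n' :: cs)) ['\n'] (((m + j' : Nat) : Int) + 1) =
        if f = -1 then -1 else ((m + j' + 1 : Nat) : Int) + f := by
      rw [show (((m + j' : Nat)) : Int) + 1 = (((m + j' + 1 : Nat)) : Int) by push_cast; ring]
      rw [PySem.Chars.findFrom_natCast _ _ (m + j' + 1) (by simp [hm] at hj'len ⊢; omega)]
      rw [show m + j' + 1 = m + (j' + 1) by omega, ← List.drop_drop, hdropm, ← hfdef]
    have htaken : ∀ n : Nat, ('\n' :: (l ++ '\n' :: cs)).take (m + n) = ('\n' :: l) ++ ('\n' :: cs).take n := by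
      intro n
      rw [show ('\n' :: (l ++ '\n' :: cs)) = ('\n' :: l) ++ ('\n' :: cs) from rfl,
        show m + n = ('\n' :: l).length + n by simp [hm]]
      exact List.take_length_add_append n
    have hdropmn : ∀ n : Nat, ('\n' :: (l ++ '\n' :: cs)).drop (m + n) = ('\n' :: cs).drop n := by
      intro n; rw [← List.drop_drop, hdropm]
    have hlenout : ('\n' :: (l ++ '\n' :: cs)).length = m + ('\n' :: cs).length := by
      simp [hm]; omega
    simp only [pvSurg, houter, hkval, hinner, houterff]
    have hne1 : ¬(((m + j' : Nat)) : Int) = -1 := by omega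
    have hne2 : ¬((j' : Nat) : Int) = -1 := by omega
    simp only [hne1, hne2, if_false]
    by_cases hfneg : f = -1
    · simp only [hfneg, reduceIte, hlenout]
      simp only [slice_to_cast, slice_mid_cast, PySem.List.slice_from_natCast]
      rw [show m + j' + 1 = m + (j' + 1) from by omega,
        show (m + ('\n' :: cs).length) - (m + (j' + 1)) = ('\n' :: cs).length - (j' + 1) from by omega,
        htaken, hdropmn, hdropmn]
      simp [List.take_succ_cons, List.drop_length, List.append_assoc]
    · have h0f : (0:Int) ≤ f := by omega
      set fn : Nat := f.toNat with hfndef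
      have hfval : f = (fn : Int) := (Int.toNat_of_nonneg h0f).symm
      have hfneg2 : ¬((fn : Nat) : Int) = -1 := by omega
      simp only [hfval, hfneg2, if_false]
      rw [show (((m + j' + 1 : Nat)) : Int) + ((fn : Nat) : Int) = (((m + j' + 1 + fn : Nat)) : Int) by push_cast; ring,
        show (((j' + 1 : Nat)) : Int) + ((fn : Nat) : Int) = (((j' + 1 + fn : Nat)) : Int) by push_cast; ring]
      have hne3 : ¬(((m + j' + 1 + fn : Nat)) : Int) = -1 := by omega
      have hne4 : ¬(((j' + 1 + fn : Nat)) : Int) = -1 := by omega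
      simp only [hne3, hne4, if_false]
      simp only [slice_to_cast, slice_mid_cast, PySem.List.slice_from_natCast]
      rw [show m + j' + 1 + fn = m + (j' + 1 + fn) from by omega,
        show m + j' + 1 = m + (j' + 1) from by omega,
        show (m + (j' + 1 + fn)) - (m + (j' + 1)) = (j' + 1 + fn) - (j' + 1) from by omega,
        htaken, hdropmn, hdropmn]
      simp [List.take_succ_cons, List.append_assoc]

-- ---- the main induction: B's surgery equals the first-node patch ----
lemma surg_join : ∀ (L : List (List Char)), (∀ l ∈ L, l ≠ [] ∧ '\n' ∉ l) →
    pvSurg (PySem.Chars.join ['\n'] L) = PySem.Chars.join ['\n'] (pvFixFirstC L)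
  | [], _ => by decide
  | l :: L', hL => by
    obtain ⟨hne, hnl⟩ := hL l List.mem_cons_self
    have hnodeNl : '\n' ∉ pvNode := by decide
    by_cases hs : PySem.Chars.startswith l pvNode = true
    · -- the head line is the node header
      have hs' : pvNode <+: l := (PySem.Chars.startswith_iff l pvNode).mp hs
      cases L' with
      | nil =>
        have hk : PySem.Chars.find ('\n' :: l) pvPat = ((0:Nat):Int) := by
          apply find_eq_of
          · show pvPat <+: ('\n' :: l).drop 0
            simp only [List.drop_zero, pvPat]
            exact List.cons_prefix_cons.mpr ⟨rfl, hs'⟩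
          · intro i hi; omega
        have hf : PySem.Chars.find (('\n' :: l).drop 1) ['\n'] = -1 := by
          rw [PySem.Chars.find_eq_neg_one_iff]
          simpa [List.singleton_infix_iff] using hnl
        have hff : PySem.Chars.findFrom ('\n' :: l) ['\n'] (((1:Nat):Int)) = -1 := by
          rw [PySem.Chars.findFrom_natCast _ _ 1 (by simp), hf]; simp
        simp only [PySem.Chars.join_singleton, pvSurg, pvFixFirstC, hs, if_true, hk]
        norm_num
        have hff' : PySem.Chars.findFrom ('\n' :: l) ['\n'] (1:Int) = -1 := by exact_mod_cast hff
        rw [hff']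
        norm_num
        rw [slice_from_head, slice_mid, slice_from_n1]
        simp
      | cons l2 L'' =>
        have hR := join_cons_of_ne_nil ['\n'] l (l2 :: L'') (by simp)
        set R := PySem.Chars.join ['\n'] (l2 :: L'') with hRdef
        have htext : PySem.Chars.join ['\n'] (l :: l2 :: L'') = l ++ '\n' :: R := by
          rw [hR]; simp
        have hk : PySem.Chars.find ('\n' :: (l ++ '\n' :: R)) pvPat = ((0:Nat):Int) := by
          apply find_eq_of
          · show pvPat <+: ('\n' :: (l ++ '\n' :: R)).drop 0
            simp only [List.drop_zero, pvPat]
            exact List.cons_prefix_cons.mpr ⟨rfl, hs'.trans (l.prefix_append ('\n' :: R))⟩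
          · intro i hi; omega
        have hf : PySem.Chars.find ((l ++ '\n' :: R)) ['\n'] = ((l.length : Nat) : Int) := by
          apply find_eq_of
          · rw [List.drop_left]
            exact List.cons_prefix_cons.mpr ⟨rfl, List.nil_prefix⟩
          · intro i hi
            rw [List.drop_append_of_le_length (by omega)]
            exact no_pref_in_line l ('\n' :: R) [] hnl i hi
        have hff : PySem.Chars.findFrom ('\n' :: (l ++ '\n' :: R)) ['\n'] (1:Int) =
            (l.length : Int) + 1 := by
          have h1 := PySem.Chars.findFrom_natCast ('\n' :: (l ++ '\n' :: R)) ['\n'] 1 (by simp)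
          rw [show (((1:Nat)):Int) = (1:Int) from rfl] at h1
          rw [h1]
          simp only [List.drop_succ_cons, List.drop_zero, hf]
          rw [if_neg (by omega)]; ring
        simp only [htext, pvSurg, pvFixFirstC, hs, if_true, hk]
        norm_num
        rw [hff]
        have hne2 : ¬((l.length:Int) + 1 = -1) := by omega
        simp only [hne2, if_false]
        rw [slice_from_head, slice_mid, slice_from_n1]
        rw [join_cons_of_ne_nil ['\n'] _ (l2 :: L'') (by simp), ← hRdef]
        simp
    · -- the head line is not the node header
      have hs' : ¬ pvNode <+: l := fun hpre => hs ((PySem.Chars.startswith_iff l pvNode).mpr hpre)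
      cases L' with
      | nil =>
        have hk : PySem.Chars.find ('\n' :: l) pvPat = -1 := by
          rw [PySem.Chars.find_eq_neg_one_iff]
          intro hinf
          rcases (PySem.Chars.exists_prefix_drop_iff_isIn pvPat ('\n' :: l)).mpr
            ((PySem.Chars.isIn_iff_infix pvPat ('\n' :: l)).mpr hinf) with ⟨j, hj⟩
          cases j with
          | zero =>
            rw [List.drop_zero] at hj
            obtain ⟨-, h2⟩ := List.cons_prefix_cons.mp (show ('\n' :: pvNode) <+: ('\n' :: l) from hj)
            exact hs' h2
          | succ i =>
            rw [List.drop_succ_cons] at hj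
            rcases lt_or_ge i l.length with hil | hil
            · have hnp := no_pref_in_line l [] pvNode hnl i hil
              rw [List.append_nil] at hnp
              exact hnp (show ('\n' :: pvNode) <+: l.drop i from hj)
            · rw [List.drop_eq_nil_of_le hil] at hj
              have hj' := List.prefix_nil.mp hj
              simp [pvPat] at hj'
        simp [PySem.Chars.join_singleton, pvSurg, pvFixFirstC, hs, hk]
      | cons l2 L'' =>
        have hR := join_cons_of_ne_nil ['\n'] l (l2 :: L'') (by simp)
        have htext : PySem.Chars.join ['\n'] (l :: l2 :: L'') =
            l ++ '\n' :: PySem.Chars.join ['\n'] (l2 :: L'') := by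
          rw [hR]; simp
        have ih := surg_join (l2 :: L'') (fun x hx => hL x (List.mem_cons_of_mem l hx))
        rw [htext, surg_step l _ hnl hs' hnodeNl, ih]
        show _ = PySem.Chars.join ['\n'] (pvFixFirstC (l :: l2 :: L''))
        rw [show pvFixFirstC (l :: l2 :: L'') = l :: pvFixFirstC (l2 :: L'') from by
          simp [pvFixFirstC, hs]]
        rw [join_cons_of_ne_nil ['\n'] l _ (fixFirstC_cons_ne_nil l2 L'')]
        simp

-- ===== VERDICT (by name: the statement is the Claim_ definition above) =====
theorem first_node_remove_parent_spec : Claim_equal_first_node_remove_parent := by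
  intro s _
  show first_node_remove_parent s = first_node_remove_parent_alt s
  apply String.toList_inj.mp
  rw [A_eq, alt_toList, PySem.Str.toList_join, map_toList_fixFirst, cleaned_bridge,
    show ("\n").toList = ['\n'] from rfl, surg_join _ (cleaned_prop s)]
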